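-- pv_equiv track=rewrite | github.com/rickcmc02/Algorithm | Programmers/ud_62050_지형이동.py | solution
-- ===== SOURCE A (Python) =====
-- dy = [0, -1, 0, 1]
--
-- dx = [-1, 0, 1, 0]
--
-- def dfs(y, x, cnt, land, height, N, land_copy, min_num):
--     land_copy[y][x] = cnt
--
--     # 매겨진 cnt의 최저값 순서대로 배치하기 위한 최저값 구하기
--     if land[y][x] < min_num[cnt-1]:
--         min_num[cnt-1] = land[y][x]
--
--     for i in range(4):
--         ny = y + dy[i]
--         nx = x + dx[i]
--         if ny >= 0 and ny < N and nx >= 0 and nx < N and not land_copy[ny][nx]: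
--             if abs(land[y][x] - land[ny][nx]) <= height:
--                 dfs(ny, nx, cnt, land, height, N, land_copy, min_num)
--
-- def solution(land, height):
--     N = len(land)
--     land_copy = [[0] * N for _ in range(N)]
--     cnt = 0
--     min_num = []
--     order_list = []
--     diff_list = []
--     answer = 0
--
--     for i in range(N):
--         for j in range(N):
--             if not land_copy[i][j]:
--                 cnt += 1
--                 min_num.append(10001)
--                 dfs(i, j, cnt, land, height, N, land_copy, min_num)
--
--     sort_min = sorted(min_num)
--     for sm in sort_min:
--         order_list.append(min_num.index(sm))
--
--     for c in range(len(order_list) - 1):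
--         diff_list.append(10001)
--         for y in range(N):
--             for x in range(N):
--                 for d in range(4):
--                     ny = y + dy[d]
--                     nx = x + dx[d]
--                     if ny >= 0 and ny < N and nx >= 0 and nx < N:
--                         if land_copy[y][x] == order_list[c] + 1 and land_copy[ny][nx] == order_list[c+1] + 1:
--                             diff = land[ny][nx] - land[y][x]
--                             if diff_list[c] > diff:
--                                 diff_list[c] = diff
--
--     return diff_list
-- ===== SOURCE B (Python) =====
-- # Alternative exact re-implementation: iterative stack flood fill for labelling, then a
-- # single grid pass building a dict of minimal edge differences per ordered label pair,
-- # looked up per consecutive group instead of A's per-pair full-grid rescans.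
-- def solution(land, height):
--     N = len(land)
--     labels = [[0] * N for _ in range(N)]
--     min_num = []
--     cnt = 0
--     for i in range(N):
--         for j in range(N):
--             if not labels[i][j]:
--                 cnt += 1
--                 min_num.append(10001)
--                 stack = [(i, j)]
--                 while stack:
--                     y, x = stack.pop()
--                     if labels[y][x]:
--                         continue
--                     labels[y][x] = cnt
--                     if land[y][x] < min_num[cnt - 1]:
--                         min_num[cnt - 1] = land[y][x]
--                     # push reversed so neighbours are explored in A's direction order
--                     for dy, dx in ((1, 0), (0, 1), (-1, 0), (0, -1)):
--                         ny, nx = y + dy, x + dx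
--                         if 0 <= ny < N and 0 <= nx < N and abs(land[y][x] - land[ny][nx]) <= height:
--                             stack.append((ny, nx))
--
--     first = {}
--     for idx, v in enumerate(min_num):
--         if v not in first:
--             first[v] = idx
--     order = [first[v] for v in sorted(min_num)]
--
--     edges = {}
--     for y in range(N):
--         for x in range(N):
--             for dy, dx in ((0, -1), (-1, 0), (0, 1), (1, 0)):
--                 ny, nx = y + dy, x + dx
--                 if 0 <= ny < N and 0 <= nx < N:
--                     key = (labels[y][x], labels[ny][nx])
--                     diff = land[ny][nx] - land[y][x]
--                     if diff < edges.get(key, 10001):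
--                         edges[key] = diff
--
--     return [edges.get((order[c] + 1, order[c + 1] + 1), 10001)
--             for c in range(len(order) - 1)]
-- ===== Notes on version B (the rewrite author's own statement) =====
-- stated objective: alternative
-- what changed: Labelling is done by an iterative stack flood fill instead of recursive DFS, and A's per-consecutive-group-pair full-grid rescans (with a 4-direction inner scan each) are replaced by one grid pass building a dict of the minimal edge height-difference per ordered label pair plus a first-index dict replacing the repeated min_num.index scans, so each of the G-1 answers is a single dict lookup; it trades A's G-1 grid rescans for one dict-building pass.
import Mathlib
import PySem

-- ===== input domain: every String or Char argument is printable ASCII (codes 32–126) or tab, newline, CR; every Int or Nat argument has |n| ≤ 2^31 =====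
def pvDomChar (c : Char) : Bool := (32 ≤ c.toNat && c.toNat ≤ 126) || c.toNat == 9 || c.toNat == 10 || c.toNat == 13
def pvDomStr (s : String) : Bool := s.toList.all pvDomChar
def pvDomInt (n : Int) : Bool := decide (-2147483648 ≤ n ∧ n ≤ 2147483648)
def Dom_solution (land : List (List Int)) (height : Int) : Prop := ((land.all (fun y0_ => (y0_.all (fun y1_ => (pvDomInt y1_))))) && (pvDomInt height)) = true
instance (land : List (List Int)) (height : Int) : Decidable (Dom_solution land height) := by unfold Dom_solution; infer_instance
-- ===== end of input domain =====

-- B relabels the grid with an iterative stack flood fill and replaces A's per-group-pair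
-- full-grid rescans by one grid pass building a dict of minimal edge differences, looked up
-- per consecutive group.  Python A mutates nothing observable outside itself.

-- ===== PORT A =====

-- (dy[i], dx[i]) pairs of A's direction lists, in A's d = 0..3 order
def pvDirs : List (Int × Int) := [(0, -1), (-1, 0), (0, 1), (1, 0)]

-- grid[y][x] as an Option (none = IndexError); indices at every use site are checked ≥ 0 first
def pvGet2? (g : List (List Int)) (y x : Int) : Option Int :=
  (PySem.List.pyGet? g y).bind (fun r => PySem.List.pyGet? r x)

-- grid[y][x]; every use is in range under Pre_solution, so the default is never returned
def pvGet2 (g : List (List Int)) (y x : Int) : Int := (pvGet2? g y x).getD 0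

-- grid[y][x] = v; only used with 0 ≤ y, 0 ≤ x, in range (grid is N×N), so .toNat is exact
def pvSet2 (g : List (List Int)) (y x v : Int) : List (List Int) :=
  g.set y.toNat ((g.getD y.toNat []).set x.toNat v)

-- number of still-unlabelled (= 0) cells: termination measure / sufficient fuel bound
def pvZ (g : List (List Int)) : Nat := (g.map (fun r => r.count 0)).sum

-- the visit step both Python programs perform verbatim on (land_copy, min_num):
-- land_copy[y][x] = cnt; if land[y][x] < min_num[cnt-1]: min_num[cnt-1] = land[y][x]
-- (cnt ≥ 1 at every call, so the (cnt-1).toNat index and getD default are exact)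
def pvVisit (land : List (List Int)) (y x cnt : Int)
    (s : List (List Int) × List Int) : List (List Int) × List Int :=
  (pvSet2 s.1 y x cnt,
   if pvGet2 land y x < s.2.getD (cnt - 1).toNat 0
   then s.2.set (cnt - 1).toNat (pvGet2 land y x) else s.2)

-- A's recursive dfs.  Fuel makes the recursion total; the entry guard (cell present and
-- unlabelled, indices ≥ 0, cnt ≠ 0) holds at every call Python performs (callers check it),
-- and fuel pvZ+1 bounds the recursion depth, so the port computes exactly what dfs computes.
def dfsA (land : List (List Int)) (height N : Int) :
    Nat → Int → Int → Int → List (List Int) × List Int → List (List Int) × List Int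
  | 0, _, _, _, s => s
  | f + 1, y, x, cnt, s =>
    if 0 ≤ y ∧ 0 ≤ x ∧ pvGet2? s.1 y x = some 0 ∧ cnt ≠ 0 then
      pvDirs.foldl (fun t d =>
        if 0 ≤ y + d.1 ∧ y + d.1 < N ∧ 0 ≤ x + d.2 ∧ x + d.2 < N ∧
           pvGet2? t.1 (y + d.1) (x + d.2) = some 0 ∧
           |pvGet2 land y x - pvGet2 land (y + d.1) (x + d.2)| ≤ height
        then dfsA land height N f (y + d.1) (x + d.2) cnt t
        else t) (pvVisit land y x cnt s)
    else s

-- A's labelling loop: for i in range(N): for j in range(N): if not land_copy[i][j]: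
--   cnt += 1; min_num.append(10001); dfs(i, j, cnt, …).  State (land_copy, min_num, cnt).
def phase1A (land : List (List Int)) (height : Int) : List (List Int) × List Int × Int :=
  let n := land.length
  let N : Int := (n : Int)
  (PySem.List.pyRange 0 N 1).foldl (fun st i =>
    (PySem.List.pyRange 0 N 1).foldl (fun st j =>
      if pvGet2? st.1 i j = some 0 then
        let s := dfsA land height N (pvZ st.1 + 1) i j (st.2.2 + 1) (st.1, st.2.1 ++ [10001])
        (s.1, s.2, st.2.2 + 1)
      else st) st)
    (List.replicate n (List.replicate n 0), [], 0)

-- A's per-pair full-grid scan computing diff_list[c] (appended as 10001, then lowered)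
def passA (land : List (List Int)) (N : Int) (grid : List (List Int))
    (order : List Int) (c : Int) : Int :=
  (PySem.List.pyRange 0 N 1).foldl (fun a y =>
    (PySem.List.pyRange 0 N 1).foldl (fun a x =>
      pvDirs.foldl (fun a d =>
        if 0 ≤ y + d.1 ∧ y + d.1 < N ∧ 0 ≤ x + d.2 ∧ x + d.2 < N then
          if pvGet2 grid y x = PySem.List.pyGetD order c 0 + 1 ∧
             pvGet2 grid (y + d.1) (x + d.2) = PySem.List.pyGetD order (c + 1) 0 + 1 then
            if a > pvGet2 land (y + d.1) (x + d.2) - pvGet2 land y x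
            then pvGet2 land (y + d.1) (x + d.2) - pvGet2 land y x else a
          else a
        else a) a) a) 10001

def solution (land : List (List Int)) (height : Int) : List Int :=
  let N : Int := (land.length : Int)
  let p := phase1A land height
  -- sort_min = sorted(min_num); order_list.append(min_num.index(sm))  (sm ∈ min_num, so
  -- .index never raises and the getD default is never returned)
  let sortMn := PySem.List.sorted p.2.1 (fun v => v) false
  let order : List Int :=
    sortMn.foldl (fun acc sm => acc ++ [(((PySem.List.index? p.2.1 sm).getD 0 : Nat) : Int)]) []
  (PySem.List.pyRange 0 ((order.length : Int) - 1) 1).foldl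
    (fun dl c => dl ++ [passA land N p.1 order c]) []

-- ===== PORT B =====

-- in-bounds neighbours within the height difference, pushed by B at push time
def nbrsOK (land : List (List Int)) (height N y x : Int) : List (Int × Int) :=
  pvDirs.filterMap (fun d =>
    if 0 ≤ y + d.1 ∧ y + d.1 < N ∧ 0 ≤ x + d.2 ∧ x + d.2 < N ∧
       |pvGet2 land y x - pvGet2 land (y + d.1) (x + d.2)| ≤ height
    then some (y + d.1, x + d.2) else none)

-- termination facts for the stack loop (stated before goB, which cites them)
theorem pv_count_set_zero (r : List Int) (m : Nat) (v : Int)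
    (h : r[m]? = some 0) (hv : v ≠ 0) : (r.set m v).count 0 + 1 = r.count 0 := by
  induction r generalizing m with
  | nil => simp at h
  | cons a t ih =>
    cases m with
    | zero =>
      simp at h
      subst h
      simp [hv]
    | succ m =>
      simp at h
      have := ih m h
      simp [List.count_cons]
      omega

theorem pv_pvZ_set (g : List (List Int)) (n : Nat) (r row' : List Int)
    (h : g[n]? = some r) : pvZ (g.set n row') + r.count 0 = pvZ g + row'.count 0 := by
  induction g generalizing n with
  | nil => simp at h
  | cons a t ih =>
    cases n with
    | zero =>
      simp at h
      subst h
      simp [pvZ]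
      omega
    | succ n =>
      simp at h
      have := ih n h
      simp [pvZ] at *
      omega

theorem pv_pvZ_visit (g : List (List Int)) (y x v : Int)
    (hy : 0 ≤ y) (hx : 0 ≤ x) (h : pvGet2? g y x = some 0) (hv : v ≠ 0) :
    pvZ (pvSet2 g y x v) + 1 = pvZ g := by
  unfold pvGet2? at h
  cases hrow : PySem.List.pyGet? g y with
  | none => rw [hrow] at h; simp at h
  | some r =>
    rw [hrow] at h
    simp at h
    rw [PySem.List.pyGet?_of_nonneg g hy] at hrow
    rw [PySem.List.pyGet?_of_nonneg r hx] at h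
    have h0 := pv_count_set_zero r x.toNat v h hv
    have hgd : g.getD y.toNat [] = r := by
      rcases List.getElem?_eq_some_iff.mp hrow with ⟨hlt, he⟩
      simp [List.getD, hrow]
    have h1 := pv_pvZ_set g y.toNat r (r.set x.toNat v) hrow
    unfold pvSet2
    rw [hgd]
    omega

-- B's stack flood fill.  The Lean list head is the Python stack's pop end (B pushes the
-- direction tuples reversed, so the pop order is A's d order); the guard re-checks what the
-- Python checks at pop time (`if labels[y][x]: continue`) plus the always-true totality
-- facts (indices ≥ 0 — pushed frames are bounds-checked — and cnt ≠ 0).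
def goB (land : List (List Int)) (height N cnt : Int) :
    List (Int × Int) → List (List Int) × List Int → List (List Int) × List Int
  | [], s => s
  | c :: st, s =>
    if h : 0 ≤ c.1 ∧ 0 ≤ c.2 ∧ pvGet2? s.1 c.1 c.2 = some 0 ∧ cnt ≠ 0 then
      goB land height N cnt (nbrsOK land height N c.1 c.2 ++ st) (pvVisit land c.1 c.2 cnt s)
    else goB land height N cnt st s
  termination_by st s => 5 * pvZ s.1 + st.length
  decreasing_by
  · have h1 := pv_pvZ_visit s.1 c.1 c.2 cnt h.1 h.2.1 h.2.2.1 h.2.2.2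
    have h2 : (nbrsOK land height N c.1 c.2).length ≤ 4 := by
      have := List.length_filterMap_le (fun d =>
        if 0 ≤ c.1 + d.1 ∧ c.1 + d.1 < N ∧ 0 ≤ c.2 + d.2 ∧ c.2 + d.2 < N ∧
           |pvGet2 land c.1 c.2 - pvGet2 land (c.1 + d.1) (c.2 + d.2)| ≤ height
        then some (c.1 + d.1, c.2 + d.2) else none) pvDirs
      simpa [nbrsOK, pvDirs] using this
    simp only [pvVisit, List.length_append, List.length_cons]
    omega
  · simp only [List.length_cons]
    omega

-- B's labelling loop: same row-major scan, flood fill from a one-element stack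
def phase1B (land : List (List Int)) (height : Int) : List (List Int) × List Int × Int :=
  let n := land.length
  let N : Int := (n : Int)
  (PySem.List.pyRange 0 N 1).foldl (fun st i =>
    (PySem.List.pyRange 0 N 1).foldl (fun st j =>
      if pvGet2? st.1 i j = some 0 then
        let s := goB land height N (st.2.2 + 1) [(i, j)] (st.1, st.2.1 ++ [10001])
        (s.1, s.2, st.2.2 + 1)
      else st) st)
    (List.replicate n (List.replicate n 0), [], 0)

-- first = {}; for idx, v in enumerate(min_num): if v not in first: first[v] = idx
def firstB (mn : List Int) : PySem.Dict Int Int :=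
  (PySem.List.enumerate mn 0).foldl
    (fun d p => if d.contains p.2 then d else d.insert p.2 p.1) PySem.Dict.empty

-- edges = {}; one grid pass keeping the minimal diff per ordered label pair
def edgesB (land : List (List Int)) (N : Int) (grid : List (List Int)) :
    PySem.Dict (Int × Int) Int :=
  (PySem.List.pyRange 0 N 1).foldl (fun d y =>
    (PySem.List.pyRange 0 N 1).foldl (fun d x =>
      pvDirs.foldl (fun d dd =>
        if 0 ≤ y + dd.1 ∧ y + dd.1 < N ∧ 0 ≤ x + dd.2 ∧ x + dd.2 < N then
          if pvGet2 land (y + dd.1) (x + dd.2) - pvGet2 land y x <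
             d.getD (pvGet2 grid y x, pvGet2 grid (y + dd.1) (x + dd.2)) 10001
          then d.insert (pvGet2 grid y x, pvGet2 grid (y + dd.1) (x + dd.2))
                 (pvGet2 land (y + dd.1) (x + dd.2) - pvGet2 land y x)
          else d
        else d) d) d) PySem.Dict.empty

def solution_alt (land : List (List Int)) (height : Int) : List Int :=
  let N : Int := (land.length : Int)
  let p := phase1B land height
  -- order = [first[v] for v in sorted(min_num)]  (v ∈ min_num so first[v] never raises)
  let order : List Int :=
    (PySem.List.sorted p.2.1 (fun v => v) false).map (fun v => ((firstB p.2.1).get? v).getD 0)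
  let edges := edgesB land N p.1
  (PySem.List.pyRange 0 ((order.length : Int) - 1) 1).map (fun c =>
    edges.getD (PySem.List.pyGetD order c 0 + 1, PySem.List.pyGetD order (c + 1) 0 + 1) 10001)

-- ===== PRECONDITION & SPEC =====

-- Python A indexes land[y][x] for all 0 ≤ y, x < len(land): it raises IndexError as soon as
-- some row is shorter than the number of rows, so exactly those inputs are excluded.
def Pre_solution (land : List (List Int)) (height : Int) : Prop :=
  ∀ r ∈ land, land.length ≤ r.length

instance (land : List (List Int)) (height : Int) : Decidable (Pre_solution land height) := by
  unfold Pre_solution; infer_instance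

def pvWitness_solution : List (List Int) × Int := ([[1, 2], [3, 10]], 2)

def Spec_solution (land : List (List Int)) (height : Int) (out : List Int) : Prop :=
  out = solution_alt land height
instance (land : List (List Int)) (height : Int) (out : List Int) :
    Decidable (Spec_solution land height out) := by unfold Spec_solution; infer_instance

-- ===== CLAIM (what is proved, stated in full; the proofs are below) =====
def Claim_equal_solution : Prop := ∀ (land : List (List Int)) (height : Int),
  Dom_solution land height → Pre_solution land height →
  Spec_solution land height (solution land height)

-- ===== LEMMAS AND PROOFS =====

theorem pv_pvZ_pos (g : List (List Int)) (y x : Int)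
    (hy : 0 ≤ y) (h : pvGet2? g y x = some 0) : 1 ≤ pvZ g := by
  unfold pvGet2? at h
  cases hrow : PySem.List.pyGet? g y with
  | none => rw [hrow] at h; simp at h
  | some r =>
    rw [hrow] at h
    simp at h
    rw [PySem.List.pyGet?_of_nonneg g hy] at hrow
    have hrmem : r ∈ g := by
      rcases List.getElem?_eq_some_iff.mp hrow with ⟨hlt, he⟩
      exact he ▸ List.getElem_mem hlt
    have h0 : (0 : Int) ∈ r := PySem.List.mem_of_pyGet?_eq_some r h
    have hc : 1 ≤ r.count 0 := List.one_le_count_iff.mpr h0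
    have : r.count 0 ∈ g.map (fun r => r.count 0) := List.mem_map_of_mem hrmem
    have := List.le_sum_of_mem this
    unfold pvZ
    omega


theorem pv_goB_nil (land : List (List Int)) (height N cnt : Int)
    (s : List (List Int) × List Int) : goB land height N cnt [] s = s := by
  simp [goB]

theorem pv_dfsA_stuck (land : List (List Int)) (height N : Int) (f : Nat) (y x cnt : Int)
    (s : List (List Int) × List Int)
    (h : ¬(0 ≤ y ∧ 0 ≤ x ∧ pvGet2? s.1 y x = some 0 ∧ cnt ≠ 0)) :
    dfsA land height N f y x cnt s = s := by
  cases f with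
  | zero => rfl
  | succ f => simp [dfsA, h]

theorem pv_pvZ_dfsA_le (land : List (List Int)) (height N : Int) (f : Nat) :
    ∀ (y x cnt : Int) (s : List (List Int) × List Int),
      pvZ ((dfsA land height N f y x cnt s).1) ≤ pvZ s.1 := by
  induction f with
  | zero => intro y x cnt s; simp [dfsA]
  | succ f ih =>
    intro y x cnt s
    by_cases h : 0 ≤ y ∧ 0 ≤ x ∧ pvGet2? s.1 y x = some 0 ∧ cnt ≠ 0
    · simp only [dfsA, if_pos h]
      have hv : pvZ ((pvVisit land y x cnt s).1) ≤ pvZ s.1 := by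
        have := pv_pvZ_visit s.1 y x cnt h.1 h.2.1 h.2.2.1 h.2.2.2
        simp only [pvVisit]
        omega
      have haux : ∀ (ds : List (Int × Int)) (t : List (List Int) × List Int),
          pvZ ((ds.foldl (fun t d =>
            if 0 ≤ y + d.1 ∧ y + d.1 < N ∧ 0 ≤ x + d.2 ∧ x + d.2 < N ∧
               pvGet2? t.1 (y + d.1) (x + d.2) = some 0 ∧
               |pvGet2 land y x - pvGet2 land (y + d.1) (x + d.2)| ≤ height
            then dfsA land height N f (y + d.1) (x + d.2) cnt t
            else t) t).1) ≤ pvZ t.1 := by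
        intro ds
        induction ds with
        | nil => intro t; simp
        | cons d ds ihd =>
          intro t
          simp only [List.foldl_cons]
          by_cases hc : 0 ≤ y + d.1 ∧ y + d.1 < N ∧ 0 ≤ x + d.2 ∧ x + d.2 < N ∧
              pvGet2? t.1 (y + d.1) (x + d.2) = some 0 ∧
              |pvGet2 land y x - pvGet2 land (y + d.1) (x + d.2)| ≤ height
          · rw [if_pos hc]
            exact le_trans (ihd _) (ih _ _ _ _)
          · rw [if_neg hc]
            exact ihd t
      exact le_trans (haux pvDirs (pvVisit land y x cnt s)) hv
    · rw [pv_dfsA_stuck land height N (f+1) y x cnt s h]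

-- A's direction loop from a state t0, with the zero test (re)done by dfsA's guard, is the
-- fold of dfsA over the bounds/height-filtered neighbour list B pushes.
theorem pv_fold_dirs (land : List (List Int)) (height N : Int) (f : Nat) (y x cnt : Int) :
    ∀ (ds : List (Int × Int)) (t0 : List (List Int) × List Int),
      ds.foldl (fun t d =>
        if 0 ≤ y + d.1 ∧ y + d.1 < N ∧ 0 ≤ x + d.2 ∧ x + d.2 < N ∧
           pvGet2? t.1 (y + d.1) (x + d.2) = some 0 ∧
           |pvGet2 land y x - pvGet2 land (y + d.1) (x + d.2)| ≤ height
        then dfsA land height N f (y + d.1) (x + d.2) cnt t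
        else t) t0
      = (ds.filterMap (fun d =>
          if 0 ≤ y + d.1 ∧ y + d.1 < N ∧ 0 ≤ x + d.2 ∧ x + d.2 < N ∧
             |pvGet2 land y x - pvGet2 land (y + d.1) (x + d.2)| ≤ height
          then some (y + d.1, x + d.2) else none)).foldl
          (fun t c => dfsA land height N f c.1 c.2 cnt t) t0 := by
  intro ds
  induction ds with
  | nil => intro t0; rfl
  | cons d ds ihd =>
    intro t0
    simp only [List.foldl_cons, List.filterMap_cons]
    by_cases hb : 0 ≤ y + d.1 ∧ y + d.1 < N ∧ 0 ≤ x + d.2 ∧ x + d.2 < N ∧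
        |pvGet2 land y x - pvGet2 land (y + d.1) (x + d.2)| ≤ height
    · rw [if_pos hb]
      by_cases hz : pvGet2? t0.1 (y + d.1) (x + d.2) = some 0
      · rw [if_pos (by tauto), List.foldl_cons]
        exact ihd _
      · rw [if_neg (by tauto), List.foldl_cons,
           pv_dfsA_stuck land height N f (y + d.1) (x + d.2) cnt t0 (by tauto)]
        exact ihd t0
    · rw [if_neg (by tauto), if_neg hb]
      exact ihd t0

-- the stack simulates the recursion: running cs ++ st is running st from the state the
-- dfsA-fold over cs produces (fuel ≥ unlabelled cells + 1 never runs out)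
theorem pv_bridge (land : List (List Int)) (height N cnt : Int) :
    ∀ (z : Nat) (cs : List (Int × Int)) (st : List (Int × Int))
      (s : List (List Int) × List Int) (f : Nat),
      pvZ s.1 ≤ z → z + 1 ≤ f →
      goB land height N cnt (cs ++ st) s
        = goB land height N cnt st
            (cs.foldl (fun t c => dfsA land height N f c.1 c.2 cnt t) s) := by
  intro z
  induction z using Nat.strong_induction_on with
  | _ z ihz =>
    intro cs
    induction cs with
    | nil => intro st s f hz hf; simp
    | cons c cs' ih =>
      intro st s f hz hf
      rw [List.cons_append, List.foldl_cons]
      by_cases hg : 0 ≤ c.1 ∧ 0 ≤ c.2 ∧ pvGet2? s.1 c.1 c.2 = some 0 ∧ cnt ≠ 0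
      · rw [goB, dif_pos hg]
        have hpos : 1 ≤ pvZ s.1 := pv_pvZ_pos s.1 c.1 c.2 hg.1 hg.2.2.1
        have hvz : pvZ ((pvVisit land c.1 c.2 cnt s).1) + 1 = pvZ s.1 := by
          have := pv_pvZ_visit s.1 c.1 c.2 cnt hg.1 hg.2.1 hg.2.2.1 hg.2.2.2
          simpa [pvVisit] using this
        have hzpos : 1 ≤ z := le_trans hpos hz
        obtain ⟨f', rfl⟩ : ∃ f', f = f' + 1 := ⟨f - 1, by omega⟩
        have hb := ihz (z - 1) (by omega) (nbrsOK land height N c.1 c.2) (cs' ++ st)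
          (pvVisit land c.1 c.2 cnt s) f' (by omega) (by omega)
        rw [hb]
        have hdfs : dfsA land height N (f' + 1) c.1 c.2 cnt s
            = (nbrsOK land height N c.1 c.2).foldl
                (fun t cc => dfsA land height N f' cc.1 cc.2 cnt t)
                (pvVisit land c.1 c.2 cnt s) := by
          rw [show dfsA land height N (f' + 1) c.1 c.2 cnt s
              = if 0 ≤ c.1 ∧ 0 ≤ c.2 ∧ pvGet2? s.1 c.1 c.2 = some 0 ∧ cnt ≠ 0 then
                  pvDirs.foldl (fun t d =>
                    if 0 ≤ c.1 + d.1 ∧ c.1 + d.1 < N ∧ 0 ≤ c.2 + d.2 ∧ c.2 + d.2 < N ∧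
                       pvGet2? t.1 (c.1 + d.1) (c.2 + d.2) = some 0 ∧
                       |pvGet2 land c.1 c.2 - pvGet2 land (c.1 + d.1) (c.2 + d.2)| ≤ height
                    then dfsA land height N f' (c.1 + d.1) (c.2 + d.2) cnt t
                    else t) (pvVisit land c.1 c.2 cnt s)
                else s from rfl, if_pos hg]
          exact pv_fold_dirs land height N f' c.1 c.2 cnt pvDirs (pvVisit land c.1 c.2 cnt s)
        rw [← hdfs]
        have hle : pvZ ((dfsA land height N (f' + 1) c.1 c.2 cnt s).1) ≤ z :=
          le_trans (pv_pvZ_dfsA_le land height N (f' + 1) c.1 c.2 cnt s) hz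
        exact ih st (dfsA land height N (f' + 1) c.1 c.2 cnt s) (f' + 1) hle hf
      · rw [goB, dif_neg hg, pv_dfsA_stuck land height N f c.1 c.2 cnt s hg]
        exact ih st s f hz hf

theorem pv_goB_eq_dfsA (land : List (List Int)) (height N cnt : Int) (y x : Int)
    (s : List (List Int) × List Int) :
    goB land height N cnt [(y, x)] s = dfsA land height N (pvZ s.1 + 1) y x cnt s := by
  have := pv_bridge land height N cnt (pvZ s.1) [(y, x)] [] s (pvZ s.1 + 1) le_rfl le_rfl
  simpa [pv_goB_nil] using this

theorem pv_phase1_eq (land : List (List Int)) (height : Int) :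
    phase1A land height = phase1B land height := by
  unfold phase1A phase1B
  apply PySem.List.foldl_congr_mem
  intro st i _
  apply PySem.List.foldl_congr_mem
  intro st' j _
  by_cases h : pvGet2? st'.1 i j = some 0
  · rw [if_pos h, if_pos h, pv_goB_eq_dfsA]
  · rw [if_neg h, if_neg h]

-- first-occurrence dict = list.index
theorem pv_firstB_fold (v : Int) :
    ∀ (l : List Int) (s : Int) (d : PySem.Dict Int Int),
      ((PySem.List.enumerate l s).foldl
        (fun d p => if d.contains p.2 then d else d.insert p.2 p.1) d).get? v
      = (d.get? v).or ((PySem.List.index? l v).map (fun n : Nat => s + (n : Int))) := by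
  intro l
  induction l with
  | nil => intro s d; simp [PySem.List.enumerate_nil, PySem.List.index?]
  | cons a l ih =>
    intro s d
    rw [PySem.List.enumerate_cons, List.foldl_cons]
    by_cases hc : d.contains a
    · rw [if_pos hc, ih]
      rcases ho : d.get? a with _ | w
      · rw [PySem.Dict.contains_eq_isSome_get?, ho] at hc; simp at hc
      · by_cases hv : v = a
        · subst hv; simp [ho]
        · have : PySem.List.index? (a :: l) v = (PySem.List.index? l v).map (· + 1) :=
            PySem.List.index?_cons_of_ne l (by omega)
          rw [this]
          congr 1
          rcases PySem.List.index? l v with _ | n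
          · rfl
          · simp; ring
    · rw [if_neg hc, ih]
      by_cases hv : v = a
      · subst hv
        have hn : d.get? v = none := by
          rcases ho : d.get? v with _ | w
          · rfl
          · rw [PySem.Dict.contains_eq_isSome_get?, ho] at hc; simp at hc
        rw [hn, PySem.Dict.get?_insert_self, PySem.List.index?_cons_self]
        simp
      · rw [PySem.Dict.get?_insert_of_ne _ _ (by omega)]
        have : PySem.List.index? (a :: l) v = (PySem.List.index? l v).map (· + 1) :=
          PySem.List.index?_cons_of_ne l (by omega)
        rw [this]
        congr 1
        rcases PySem.List.index? l v with _ | n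
        · rfl
        · simp; ring

theorem pv_firstB_get? (mn : List Int) (v : Int) :
    (firstB mn).get? v = (PySem.List.index? mn v).map (fun n : Nat => (n : Int)) := by
  unfold firstB
  rw [pv_firstB_fold v mn 0 PySem.Dict.empty]
  simp [PySem.Dict.get?_empty, Option.or]

theorem pv_order_eq (mn : List Int) :
    (PySem.List.sorted mn (fun v => v) false).foldl
      (fun acc sm => acc ++ [(((PySem.List.index? mn sm).getD 0 : Nat) : Int)]) []
    = (PySem.List.sorted mn (fun v => v) false).map (fun v => ((firstB mn).get? v).getD 0) := by
  rw [PySem.List.foldl_append_singleton_eq_map]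
  simp only [List.nil_append]
  apply List.map_congr_left
  intro v hv
  rw [pv_firstB_get? mn v]
  rcases PySem.List.index? mn v with _ | n <;> rfl

-- foldl over a filterMap (the if-shaped one both grid passes use)
theorem pv_foldl_filterMap {α β γ : Type} (f : α → Option γ) (g : β → γ → β) :
    ∀ (l : List α) (b : β),
      (l.filterMap f).foldl g b = l.foldl (fun b a => ((f a).map (g b)).getD b) b := by
  intro l
  induction l with
  | nil => intro b; rfl
  | cons a l ih =>
    intro b
    rw [List.filterMap_cons]
    cases hfa : f a with
    | none =>
      rw [List.foldl_cons]
      simp only [hfa]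
      show _ = List.foldl _ ((Option.map (g b) (none : Option γ)).getD b) l
      exact ih b
    | some c =>
      rw [List.foldl_cons, List.foldl_cons]
      simp only [hfa]
      show _ = List.foldl _ ((Option.map (g b) (some c)).getD b) l
      exact ih (g b c)

-- the directed edge list both grid passes enumerate, row-major, d in 0..3 order
def pvE (land : List (List Int)) (N : Int) (grid : List (List Int)) :
    List ((Int × Int) × Int) :=
  (PySem.List.pyRange 0 N 1).flatMap (fun y =>
    (PySem.List.pyRange 0 N 1).flatMap (fun x =>
      pvDirs.filterMap (fun d =>
        if 0 ≤ y + d.1 ∧ y + d.1 < N ∧ 0 ≤ x + d.2 ∧ x + d.2 < N then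
          some ((pvGet2 grid y x, pvGet2 grid (y + d.1) (x + d.2)),
                pvGet2 land (y + d.1) (x + d.2) - pvGet2 land y x)
        else none)))

theorem pv_grid_fold {β : Type} (land : List (List Int)) (N : Int)
    (grid : List (List Int)) (F : β → (Int × Int) × Int → β) (b : β) :
    (PySem.List.pyRange 0 N 1).foldl (fun b y =>
      (PySem.List.pyRange 0 N 1).foldl (fun b x =>
        pvDirs.foldl (fun b d =>
          if 0 ≤ y + d.1 ∧ y + d.1 < N ∧ 0 ≤ x + d.2 ∧ x + d.2 < N then
            F b ((pvGet2 grid y x, pvGet2 grid (y + d.1) (x + d.2)),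
                 pvGet2 land (y + d.1) (x + d.2) - pvGet2 land y x)
          else b) b) b) b
    = (pvE land N grid).foldl F b := by
  unfold pvE
  rw [List.foldl_flatMap]
  apply PySem.List.foldl_congr_mem
  intro b0 y _
  rw [List.foldl_flatMap]
  apply PySem.List.foldl_congr_mem
  intro b1 x _
  rw [pv_foldl_filterMap]
  apply PySem.List.foldl_congr_mem
  intro b2 d _
  by_cases h : 0 ≤ y + d.1 ∧ y + d.1 < N ∧ 0 ≤ x + d.2 ∧ x + d.2 < N
  · rw [if_pos h, if_pos h]; rfl
  · rw [if_neg h, if_neg h]; rfl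

-- lookup in the min-dict built over a pair list = running min over the matching pairs
theorem pv_dict_min (k : Int × Int) :
    ∀ (L : List ((Int × Int) × Int)) (d : PySem.Dict (Int × Int) Int),
      (L.foldl (fun d p => if p.2 < d.getD p.1 10001 then d.insert p.1 p.2 else d) d).getD k 10001
      = L.foldl (fun a p => if p.1 = k then (if a > p.2 then p.2 else a) else a)
          (d.getD k 10001) := by
  intro L
  induction L with
  | nil => intro d; rfl
  | cons p L ih =>
    intro d
    simp only [List.foldl_cons]
    by_cases hk : p.1 = k
    · subst hk
      by_cases hlt : p.2 < d.getD p.1 10001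
      · rw [if_pos hlt, ih, if_pos rfl, if_pos (by omega), PySem.Dict.getD_insert_self]
      · rw [if_neg hlt, ih, if_pos rfl, if_neg (by omega)]
    · by_cases hlt : p.2 < d.getD p.1 10001
      · rw [if_pos hlt, ih, if_neg hk, PySem.Dict.getD_insert_of_ne _ _ _ (Ne.symm hk)]
      · rw [if_neg hlt, ih, if_neg hk]

theorem pv_pass_eq (land : List (List Int)) (N : Int) (grid : List (List Int))
    (order : List Int) (c : Int) :
    passA land N grid order c
      = (edgesB land N grid).getD
          (PySem.List.pyGetD order c 0 + 1, PySem.List.pyGetD order (c + 1) 0 + 1) 10001 := by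
  unfold passA edgesB
  rw [pv_grid_fold land N grid (fun a (e : (Int × Int) × Int) =>
        if e.1.1 = PySem.List.pyGetD order c 0 + 1 ∧ e.1.2 = PySem.List.pyGetD order (c + 1) 0 + 1
        then (if a > e.2 then e.2 else a) else a) 10001,
      pv_grid_fold land N grid (fun d (e : (Int × Int) × Int) =>
        if e.2 < d.getD e.1 10001 then d.insert e.1 e.2 else d) PySem.Dict.empty,
      pv_dict_min]
  rw [show (PySem.Dict.empty : PySem.Dict (Int × Int) Int).getD
        (PySem.List.pyGetD order c 0 + 1, PySem.List.pyGetD order (c + 1) 0 + 1) 10001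
      = 10001 from rfl]
  apply PySem.List.foldl_congr_mem
  intro a p _
  by_cases h : p.1 = (PySem.List.pyGetD order c 0 + 1, PySem.List.pyGetD order (c + 1) 0 + 1)
  · rw [if_pos h, if_pos (by rw [Prod.ext_iff] at h; exact h)]
  · rw [if_neg h, if_neg (by rw [Prod.ext_iff] at h; exact h)]

-- ===== VERDICT (by name: the statement is the Claim_ definition above) =====
theorem solution_spec : Claim_equal_solution := by
  intro land height _ _
  unfold Spec_solution solution solution_alt
  dsimp only
  rw [pv_phase1_eq, pv_order_eq]
  rw [PySem.List.foldl_append_singleton_eq_map]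
  simp only [List.nil_append]
  apply List.map_congr_left
  intro c _
  exact pv_pass_eq land (land.length : Int) (phase1B land height).1
    ((PySem.List.sorted (phase1B land height).2.1 (fun v => v) false).map
      (fun v => ((firstB (phase1B land height).2.1).get? v).getD 0)) c
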